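-- pv_equiv track=rewrite | github.com/nicoaira/GINflow | bin/aggregate_structural_contigs.py | has_cross_pair
-- ===== SOURCE A (Python) =====
-- def has_cross_pair(pairs: dict, s1: int, e1: int, s2: int, e2: int) -> bool:
--     for i in range(s1, e1 + 1):
--         j = pairs.get(i)
--         if j and s2 <= j <= e2:
--             return True
--     for i in range(s2, e2 + 1):
--         j = pairs.get(i)
--         if j and s1 <= j <= e1:
--             return True
--     return False
-- ===== SOURCE B (Python) =====
-- def has_cross_pair(pairs: dict, s1: int, e1: int, s2: int, e2: int) -> bool:
--     for i, j in pairs.items():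
--         if j and ((s1 <= i <= e1 and s2 <= j <= e2) or (s2 <= i <= e2 and s1 <= j <= e1)):
--             return True
--     return False
-- ===== Notes on version B (the rewrite author's own statement) =====
-- stated objective: idiomatic
-- what changed: Replaces A's two range-driven loops that probe the dict key by key with a single pass over pairs.items(), testing each stored base pair against both index spans directly.
import Mathlib
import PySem

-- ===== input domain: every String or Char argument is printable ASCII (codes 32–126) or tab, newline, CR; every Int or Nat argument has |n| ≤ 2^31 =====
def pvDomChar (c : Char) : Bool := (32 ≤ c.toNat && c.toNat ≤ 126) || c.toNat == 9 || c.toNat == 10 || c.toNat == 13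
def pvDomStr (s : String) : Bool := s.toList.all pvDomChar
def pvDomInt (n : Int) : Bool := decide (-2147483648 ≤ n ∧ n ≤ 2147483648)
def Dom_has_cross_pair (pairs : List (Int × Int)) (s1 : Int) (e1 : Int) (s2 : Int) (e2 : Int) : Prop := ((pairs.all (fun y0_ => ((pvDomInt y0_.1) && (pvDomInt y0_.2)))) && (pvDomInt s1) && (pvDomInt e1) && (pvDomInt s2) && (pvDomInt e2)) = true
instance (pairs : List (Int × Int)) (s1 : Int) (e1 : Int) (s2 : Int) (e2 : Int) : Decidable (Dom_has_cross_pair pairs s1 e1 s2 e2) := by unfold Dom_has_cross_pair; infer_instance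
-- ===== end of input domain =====

-- B replaces A's two range-driven key probes with one pass over the dict's items (idiomatic, same result).
-- ===== PORT A =====
def has_cross_pair (pairs : List (Int × Int)) (s1 : Int) (e1 : Int) (s2 : Int) (e2 : Int) : Bool :=
  let d := PySem.Dict.ofList pairs
  -- first loop: for i in range(s1, e1 + 1): j = pairs.get(i); if j and s2 <= j <= e2: return True
  if (PySem.List.pyRange s1 (e1 + 1) 1).any (fun i =>
       match d.get? i with
       | some j => j != 0 && decide (s2 ≤ j) && decide (j ≤ e2)
       | none => false) then true
  -- second loop: for i in range(s2, e2 + 1): j = pairs.get(i); if j and s1 <= j <= e1: return True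
  else if (PySem.List.pyRange s2 (e2 + 1) 1).any (fun i =>
       match d.get? i with
       | some j => j != 0 && decide (s1 ≤ j) && decide (j ≤ e1)
       | none => false) then true
  else false

-- ===== PORT B =====
def has_cross_pair_alt (pairs : List (Int × Int)) (s1 : Int) (e1 : Int) (s2 : Int) (e2 : Int) : Bool :=
  (PySem.Dict.ofList pairs).items.any (fun p =>
    p.2 != 0 &&
      ((decide (s1 ≤ p.1) && decide (p.1 ≤ e1) && decide (s2 ≤ p.2) && decide (p.2 ≤ e2)) ||
       (decide (s2 ≤ p.1) && decide (p.1 ≤ e2) && decide (s1 ≤ p.2) && decide (p.2 ≤ e1))))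

-- ===== PRECONDITION & SPEC =====
def Spec_has_cross_pair (pairs : List (Int × Int)) (s1 : Int) (e1 : Int) (s2 : Int) (e2 : Int) (out : Bool) : Prop := out = has_cross_pair_alt pairs s1 e1 s2 e2
instance (pairs : List (Int × Int)) (s1 : Int) (e1 : Int) (s2 : Int) (e2 : Int) (out : Bool) : Decidable (Spec_has_cross_pair pairs s1 e1 s2 e2 out) := by unfold Spec_has_cross_pair; infer_instance

-- ===== CLAIM (what is proved, stated in full; the proofs are below) =====
def Claim_equal_has_cross_pair : Prop := ∀ (pairs : List (Int × Int)) (s1 : Int) (e1 : Int) (s2 : Int) (e2 : Int), Dom_has_cross_pair pairs s1 e1 s2 e2 → Spec_has_cross_pair pairs s1 e1 s2 e2 (has_cross_pair pairs s1 e1 s2 e2)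

-- ===== LEMMAS AND PROOFS =====

-- ===== VERDICT (by name: the statement is the Claim_ definition above) =====
lemma match_get?_eq_true {d : PySem.Dict Int Int} {i : Int} {c : Int → Bool} :
    ((match d.get? i with | some j => c j | none => false) = true) ↔
      ∃ j, d.get? i = some j ∧ c j = true := by
  cases h : d.get? i <;> simp only [h] <;> simp

lemma if_if_or (x y : Bool) : (if x then true else if y then true else false) = (x || y) := by
  cases x <;> cases y <;> rfl

theorem has_cross_pair_spec : Claim_equal_has_cross_pair := by
  intro pairs s1 e1 s2 e2 _
  unfold Spec_has_cross_pair has_cross_pair has_cross_pair_alt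
  have hnd : (PySem.Dict.ofList pairs).keys.Nodup := PySem.Dict.nodup_keys_ofList pairs
  rw [if_if_or, Bool.eq_iff_iff]
  simp only [Bool.or_eq_true, List.any_eq_true, PySem.List.mem_pyRange_one, match_get?_eq_true,
    PySem.Dict.get?_eq_some_iff_mem_items _ _ _ hnd, Bool.and_eq_true,
    bne_iff_ne, ne_eq, decide_eq_true_eq]
  constructor
  · rintro (⟨i, ⟨hi1, hi2⟩, j, hmem, ⟨hj0, hj1⟩, hj2⟩ | ⟨i, ⟨hi1, hi2⟩, j, hmem, ⟨hj0, hj1⟩, hj2⟩)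
    · exact ⟨(i, j), hmem, hj0, Or.inl ⟨⟨⟨hi1, by omega⟩, hj1⟩, hj2⟩⟩
    · exact ⟨(i, j), hmem, hj0, Or.inr ⟨⟨⟨hi1, by omega⟩, hj1⟩, hj2⟩⟩
  · rintro ⟨⟨i, j⟩, hmem, hj0, ⟨⟨⟨hi1, hi2⟩, hj1⟩, hj2⟩ | ⟨⟨⟨hi1, hi2⟩, hj1⟩, hj2⟩⟩
    · exact Or.inl ⟨i, ⟨hi1, by omega⟩, j, hmem, ⟨hj0, hj1⟩, hj2⟩
    · exact Or.inr ⟨i, ⟨hi1, by omega⟩, j, hmem, ⟨hj0, hj1⟩, hj2⟩
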